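-- pv_equiv track=rewrite | github.com/caljoseph/scene-segmentation | SceneSegmenter/SceneSegmenter.py | convert_to_tokens
-- ===== SOURCE A (Python) =====
-- def convert_to_tokens(scene_indices, text_units):
--     token_counts = []
--     current_count = 0
--     for i, unit in enumerate(text_units):
--         if i in scene_indices:
--             token_counts.append(current_count)
--         current_count += len(unit.split())
--     token_counts.append(current_count)  # Add total token count at the end
--     return token_counts
-- ===== SOURCE B (Python) =====
-- def convert_to_tokens(scene_indices, text_units):
--     prefix = [0]
--     for unit in text_units:
--         prefix.append(prefix[-1] + len(unit.split()))
--     boundaries = sorted(set(i for i in scene_indices if 0 <= i < len(text_units)))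
--     return [prefix[i] for i in boundaries] + [prefix[-1]]
-- ===== Notes on version B (the rewrite author's own statement) =====
-- stated objective: alternative
-- what changed: Replaces the fused accumulate-and-membership-test loop over units with a prefix-sum table built in one pass plus a selection pass over sorted(set(in-range scene indices)).
import Mathlib
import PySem

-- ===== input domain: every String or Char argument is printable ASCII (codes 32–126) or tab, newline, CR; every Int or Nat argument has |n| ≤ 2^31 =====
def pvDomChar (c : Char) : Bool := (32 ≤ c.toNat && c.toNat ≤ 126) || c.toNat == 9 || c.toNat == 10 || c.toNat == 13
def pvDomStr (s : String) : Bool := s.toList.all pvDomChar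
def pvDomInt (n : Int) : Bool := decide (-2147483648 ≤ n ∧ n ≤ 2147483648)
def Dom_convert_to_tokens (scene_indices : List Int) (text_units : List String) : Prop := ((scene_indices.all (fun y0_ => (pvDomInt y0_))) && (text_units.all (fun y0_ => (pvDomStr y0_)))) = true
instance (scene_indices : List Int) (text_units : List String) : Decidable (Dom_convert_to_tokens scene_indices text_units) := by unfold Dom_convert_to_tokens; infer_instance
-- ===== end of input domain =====

-- B replaces A's fused accumulate-and-membership-test loop by a prefix-sum table
-- plus a selection pass over sorted(set(in-range scene indices)) (alternative decomposition).

-- ===== PORT A =====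
def convert_to_tokens (scene_indices : List Int) (text_units : List String) : List Int :=
  let r := (PySem.List.enumerate text_units).foldl
    (fun (st : List Int × Int) iu =>
      let tc := if scene_indices.contains iu.1 then st.1 ++ [st.2] else st.1
      (tc, st.2 + ((PySem.Str.split₀ iu.2).length : Int)))
    ([], 0)
  r.1 ++ [r.2]

-- ===== PORT B =====
def convert_to_tokens_alt (scene_indices : List Int) (text_units : List String) : List Int :=
  let pfx := text_units.foldl
    (fun (pr : List Int) u => pr ++ [PySem.List.pyGetD pr (-1) 0 + ((PySem.Str.split₀ u).length : Int)])
    [0]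
  let boundaries := PySem.List.sorted
    (PySem.Set.ofList (scene_indices.filter
      (fun i => decide (0 ≤ i) && decide (i < (text_units.length : Int)))))
    (fun x => x) false
  boundaries.map (fun i => PySem.List.pyGetD pfx i 0) ++ [PySem.List.pyGetD pfx (-1) 0]

-- ===== PRECONDITION & SPEC =====
def Spec_convert_to_tokens (scene_indices : List Int) (text_units : List String) (out : List Int) : Prop := out = convert_to_tokens_alt scene_indices text_units
instance (scene_indices : List Int) (text_units : List String) (out : List Int) : Decidable (Spec_convert_to_tokens scene_indices text_units out) := by unfold Spec_convert_to_tokens; infer_instance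

-- ===== CLAIM (what is proved, stated in full; the proofs are below) =====
def Claim_equal_convert_to_tokens : Prop := ∀ (scene_indices : List Int) (text_units : List String), Dom_convert_to_tokens scene_indices text_units → Spec_convert_to_tokens scene_indices text_units (convert_to_tokens scene_indices text_units)

-- ===== LEMMAS AND PROOFS =====

/-- Token count of one unit. -/
def pvTok (u : String) : Int := ((PySem.Str.split₀ u).length : Int)

/-- Sum of token counts of the first `j` units. -/
def pvS (l : List String) (j : Nat) : Int := ((l.take j).map pvTok).sum

/-- Recursive description of A's emitted boundary counts, starting at index `k`
with running count `c`. -/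
def pvAOut (si : List Int) (k : Nat) (c : Int) : List String → List Int
  | [] => []
  | u :: t => (if si.contains (k : Int) then [c] else []) ++ pvAOut si (k+1) (c + pvTok u) t

theorem pvAOut_fold (si : List Int) : ∀ (l : List String) (k : Nat) (tc : List Int) (c : Int),
    (PySem.List.enumerate l (k : Int)).foldl
      (fun (st : List Int × Int) iu =>
        let tc := if si.contains iu.1 then st.1 ++ [st.2] else st.1
        (tc, st.2 + ((PySem.Str.split₀ iu.2).length : Int)))
      (tc, c)
    = (tc ++ pvAOut si k c l, c + (l.map pvTok).sum) := by
  intro l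
  induction l with
  | nil => intro k tc c; simp [PySem.List.enumerate_nil, pvAOut]
  | cons u t ih =>
    intro k tc c
    rw [PySem.List.enumerate_cons]
    have hcast : (k : Int) + 1 = ((k + 1 : Nat) : Int) := by push_cast; ring
    simp only [List.foldl_cons, hcast]
    rw [ih (k+1)]
    simp only [pvAOut]
    by_cases h : (k : Int) ∈ si <;>
      simp [h, pvTok, List.append_assoc, add_assoc]

theorem pvAOut_eq (si : List Int) : ∀ (l : List String) (k : Nat) (c : Int),
    pvAOut si k c l =
      ((List.range l.length).filter (fun j => si.contains ((k + j : Nat) : Int))).map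
        (fun j => c + pvS l j) := by
  intro l
  induction l with
  | nil => intro k c; simp [pvAOut]
  | cons u t ih =>
    intro k c
    have hS : ∀ j : Nat, c + pvS (u :: t) (j + 1) = (c + pvTok u) + pvS t j := by
      intro j; simp [pvS, List.take_succ_cons]; ring
    have hK : ∀ j : Nat, ((k + (j + 1) : Nat) : Int) = ((k + 1 + j : Nat) : Int) := by
      intro j; push_cast; ring
    simp only [pvAOut, ih (k+1), List.length_cons, List.range_succ_eq_map,
      List.filter_cons, List.filter_map, Function.comp_def, Nat.succ_eq_add_one, hK]
    by_cases h : ((k : Nat) : Int) ∈ si <;>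
      simp [h, List.map_map, Function.comp_def, Nat.succ_eq_add_one,
        List.take_succ_cons, pvS, add_assoc]

/-- Recursive description of the tail of B's prefix table after start `c`. -/
def pvG (c : Int) : List String → List Int
  | [] => []
  | u :: t => (c + pvTok u) :: pvG (c + pvTok u) t

theorem pvPfx_gen : ∀ (l : List String) (pr : List Int) (h : pr ≠ []),
    l.foldl (fun (pr : List Int) u => pr ++ [PySem.List.pyGetD pr (-1) 0 + ((PySem.Str.split₀ u).length : Int)]) pr
      = pr ++ pvG (pr.getLast h) l := by
  intro l
  induction l with
  | nil => intro pr h; simp [pvG]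
  | cons u t ih =>
    intro pr h
    simp only [List.foldl_cons, PySem.List.pyGetD_neg_one pr 0 h]
    rw [ih (pr ++ [pr.getLast h + ((PySem.Str.split₀ u).length : Int)]) (by simp)]
    simp [pvG, pvTok, List.append_assoc]

theorem pvG_eq : ∀ (l : List String) (c : Int),
    c :: pvG c l = (List.range (l.length + 1)).map (fun j => c + pvS l j) := by
  intro l
  induction l with
  | nil => intro c; simp [pvG, pvS]
  | cons u t ih =>
    intro c
    have hS : ∀ j : Nat, c + pvS (u :: t) (j + 1) = (c + pvTok u) + pvS t j := by
      intro j; simp [pvS, List.take_succ_cons]; ring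
    rw [show (u :: t).length + 1 = t.length + 1 + 1 from rfl, List.range_succ_eq_map,
      List.map_cons, List.map_map]
    have hcomp : ((fun j => c + pvS (u :: t) j) ∘ Nat.succ) = fun j => (c + pvTok u) + pvS t j := by
      funext j; simp [Function.comp, Nat.succ_eq_add_one, hS]
    rw [hcomp, ← ih (c + pvTok u)]
    simp [pvG, pvS]

theorem pvPfx_fold (l : List String) :
    l.foldl (fun (pr : List Int) u => pr ++ [PySem.List.pyGetD pr (-1) 0 + ((PySem.Str.split₀ u).length : Int)]) [0]
      = (List.range (l.length + 1)).map (pvS l) := by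
  have h := pvPfx_gen l [0] (by simp)
  simp only [h, List.getLast_singleton]
  have h2 := pvG_eq l 0
  simp only [zero_add] at h2
  simpa using h2

theorem pvBoundaries_eq (si : List Int) (n : Nat) :
    PySem.List.sorted
      (PySem.Set.ofList (si.filter (fun i => decide (0 ≤ i) && decide (i < (n : Int)))))
      (fun x => x) false
    = ((List.range n).filter (fun j => si.contains ((j : Nat) : Int))).map (fun j : Nat => (j : Int)) := by
  apply PySem.List.sorted_eq_of_perm_of_pairwise_lt
  · rw [List.perm_ext_iff_of_nodup]
    · intro x
      simp [PySem.Set.mem_ofList, List.mem_filter]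
      constructor
      · rintro ⟨a, ⟨ha, hm⟩, rfl⟩; exact ⟨hm, by omega, by omega⟩
      · rintro ⟨hm, h0, hn⟩
        exact ⟨x.toNat, ⟨by omega, by rwa [Int.toNat_of_nonneg h0]⟩, by omega⟩
    · exact List.Nodup.map Nat.cast_injective (List.nodup_range.filter _)
    · exact PySem.Set.nodup_ofList _
  · rw [List.pairwise_map]
    exact (List.pairwise_lt_range.filter _).imp (fun h => by exact_mod_cast h)

theorem convert_to_tokens_spec : Claim_equal_convert_to_tokens := by
  unfold Claim_equal_convert_to_tokens
  intro si tu _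
  unfold Spec_convert_to_tokens convert_to_tokens convert_to_tokens_alt
  have hstart : PySem.List.enumerate tu = PySem.List.enumerate tu ((0 : Nat) : Int) := rfl
  rw [hstart, pvAOut_fold si tu 0 [] 0, pvPfx_fold tu, pvBoundaries_eq si tu.length,
    pvAOut_eq si tu 0 0]
  simp only [List.nil_append, List.map_map, Function.comp_def, zero_add]
  congr 1
  · apply List.map_congr_left
    intro j hj
    rw [List.mem_filter, List.mem_range] at hj
    rw [PySem.List.pyGetD_natCast, PySem.List.getD_map_range _ _ _ _ (by omega)]
  · rw [PySem.List.pyGetD_neg_one _ 0 (by simp), List.getLast_eq_getElem]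
    simp [pvS]
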